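-- pv_equiv track=rewrite | github.com/data-weaverss/algorithm | sol/baekjoon/41_Acka.py | solution
-- ===== SOURCE A (Python) =====
-- MOD = 1000000007
--
-- dp = [[[[-1 for _ in range(51)] for _ in range(51)] for _ in range(51)] for _ in range(51)]
--
-- def solution(song_cnt, d, k, h):
--     """
--     d, k, h 중 적어도 한 명이 불러야 함
--     녹음해야 하는 곡 song_cnt에서, 앨범을 만들 수 있는 방법의 수를 반환
--
--     1 <= song_cnt <= 50
--     1 <= d, k, h <= song_cnt
--
--     총 시간 복잡도:  O(song_cnt * d * k * h) = 10^6
--     핵심 아이디어: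
--     - 각 노래마다 (i, j, l)의 조합으로 누가 노래를 부를지를 결정
--     """
--     if d < 0 or k < 0 or h < 0:
--         return 0
--
--     # 모든 곡을 다 불렀을 때, 남은 곡 수도 0이면 valid
--     if song_cnt == 0:
--         return 1 if d == 0 and k == 0 and h == 0 else 0
--
--     # 이미 계산한 상태면 메모이제이션 반환
--     if dp[song_cnt][d][k][h] != -1:
--         return dp[song_cnt][d][k][h]
--
--     dp[song_cnt][d][k][h] = 0
--
--     # 한 곡을 d, k, h 중 최소 1명, 최대 3명 불러야 함
--     for i in (0, 1):
--         for j in (0, 1):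
--             for l in (0, 1):
--                 if i + j + l == 0: # (0, 0, 0)은 제외하고
--                     continue
--                 dp[song_cnt][d][k][h] += solution(song_cnt - 1, d - i, k - j, h - l)
--                 dp[song_cnt][d][k][h] %= MOD
--
--     return dp[song_cnt][d][k][h]
-- ===== SOURCE B (Python) =====
-- MOD = 1000000007
--
-- def _binom(n, r):
--     # C(n, r), 0 if r out of range; multiplicative formula with exact division
--     if r < 0 or r > n:
--         return 0
--     b = 1
--     for i in range(r):
--         b = b * (n - i) // (i + 1)
--     return b
--
-- def solution(song_cnt, d, k, h):
--     # Count triples of subsets (for d, k, h) of the song_cnt songs with the given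
--     # exact sizes whose union covers every song, via inclusion-exclusion over the
--     # set of uncovered songs:  sum_m (-1)^m C(n,m) C(n-m,d) C(n-m,k) C(n-m,h)  (mod 1e9+7).
--     n = song_cnt
--     if d < 0 or k < 0 or h < 0 or d > n or k > n or h > n:
--         return 0
--     total = 0
--     for m in range(n + 1):
--         r = n - m
--         t = _binom(n, m) * _binom(r, d) * _binom(r, k) * _binom(r, h)
--         if m % 2 == 0:
--             total += t
--         else:
--             total -= t
--     return total % MOD
-- ===== Notes on version B (the rewrite author's own statement) =====
-- stated objective: alternative
-- what changed: Replaced A's memoized 4-parameter recursion over (songs left, d, k, h) by a closed-form inclusion-exclusion over the number of uncovered songs, sum_m (-1)^m C(n,m)C(n-m,d)C(n-m,k)C(n-m,h) mod 1e9+7, with binomials computed by the multiplicative formula.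
-- outside the precondition, e.g. on solution(-1, 0, 0, 0): A returns 0, B returns 0
import Mathlib
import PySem

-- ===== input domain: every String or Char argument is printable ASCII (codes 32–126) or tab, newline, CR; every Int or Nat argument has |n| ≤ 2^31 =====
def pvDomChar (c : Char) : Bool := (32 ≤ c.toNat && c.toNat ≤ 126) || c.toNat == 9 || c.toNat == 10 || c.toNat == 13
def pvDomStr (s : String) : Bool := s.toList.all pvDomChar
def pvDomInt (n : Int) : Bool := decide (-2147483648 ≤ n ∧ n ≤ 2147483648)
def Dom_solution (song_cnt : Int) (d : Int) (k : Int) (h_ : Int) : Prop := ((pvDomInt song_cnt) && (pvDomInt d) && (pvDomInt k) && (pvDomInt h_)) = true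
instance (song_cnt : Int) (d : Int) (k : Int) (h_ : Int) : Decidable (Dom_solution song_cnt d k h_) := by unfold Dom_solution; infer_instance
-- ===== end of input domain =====

-- B replaces A's memoized 4-parameter recursion by a closed-form inclusion–exclusion
-- sum over the number of uncovered songs, with binomials computed multiplicatively.

-- ===== PORT A =====
-- A's module-level memo table `dp` is ported as a hash map threaded through the
-- recursion (a fresh table per top-level call: the persistent global only caches
-- values the recursion would recompute identically, so the return value is the same).
def pvMod : Int := 1000000007

def pvTriples : List (Int × Int × Int) :=
  [(0,0,1),(0,1,0),(0,1,1),(1,0,0),(1,0,1),(1,1,0),(1,1,1)]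

def goA (fuel : Nat) (n d k h : Int)
    (memo : Std.HashMap (Int × Int × Int × Int) Int) :
    Int × Std.HashMap (Int × Int × Int × Int) Int :=
  if d < 0 ∨ k < 0 ∨ h < 0 then (0, memo)
  else if n = 0 then (if d = 0 ∧ k = 0 ∧ h = 0 then 1 else 0, memo)
  else
    match memo[(n, d, k, h)]? with
    | some v => (v, memo)
    | none =>
      match fuel with
      | 0 => (0, memo)  -- fuel totality guard only; never reached when 0 ≤ n and n.toNat ≤ fuel
      | fuel' + 1 =>
        let r := pvTriples.foldl (fun acc t =>
            let s := goA fuel' (n - 1) (d - t.1) (k - t.2.1) (h - t.2.2) acc.2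
            (PySem.Int.mod (acc.1 + s.1) pvMod, s.2)) (0, memo)
        (r.1, r.2.insert (n, d, k, h) r.1)

def solution (song_cnt : Int) (d : Int) (k : Int) (h_ : Int) : Int :=
  (goA song_cnt.toNat song_cnt d k h_ ∅).1

-- ===== PORT B =====
def pyBinom (n r : Int) : Int :=
  if r < 0 ∨ r > n then 0
  else (PySem.List.pyRange 0 r 1).foldl
        (fun b i => PySem.Int.floordiv (b * (n - i)) (i + 1)) 1

def solution_alt (song_cnt : Int) (d : Int) (k : Int) (h_ : Int) : Int :=
  if d < 0 ∨ k < 0 ∨ h_ < 0 ∨ d > song_cnt ∨ k > song_cnt ∨ h_ > song_cnt then 0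
  else
    PySem.Int.mod
      ((PySem.List.pyRange 0 (song_cnt + 1) 1).foldl (fun total m =>
        let t := pyBinom song_cnt m * pyBinom (song_cnt - m) d *
                 pyBinom (song_cnt - m) k * pyBinom (song_cnt - m) h_
        if PySem.Int.mod m 2 = 0 then total + t else total - t) 0)
      pvMod

-- ===== PRECONDITION & SPEC =====
-- Pre_ excludes (a) song_cnt or d/k/h above 50 with the fast guards not firing, where A
-- raises IndexError on its 51^4 table, and (b) negative song_cnt unless a negative d/k/h
-- makes A return 0 before indexing: there Python's negative indices alias the global memo
-- table, so A either crashes deeper down or returns a value that depends on call history.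
def Pre_solution (song_cnt : Int) (d : Int) (k : Int) (h_ : Int) : Prop :=
  (d < 0 ∨ k < 0 ∨ h_ < 0) ∨ song_cnt = 0 ∨
    (1 ≤ song_cnt ∧ song_cnt ≤ 50 ∧ d ≤ 50 ∧ k ≤ 50 ∧ h_ ≤ 50)
instance (song_cnt : Int) (d : Int) (k : Int) (h_ : Int) : Decidable (Pre_solution song_cnt d k h_) := by
  unfold Pre_solution; infer_instance

def pvWitness_solution : Int × Int × Int × Int := (3, 2, 2, 1)

def Spec_solution (song_cnt : Int) (d : Int) (k : Int) (h_ : Int) (out : Int) : Prop := out = solution_alt song_cnt d k h_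
instance (song_cnt : Int) (d : Int) (k : Int) (h_ : Int) (out : Int) : Decidable (Spec_solution song_cnt d k h_ out) := by unfold Spec_solution; infer_instance

-- ===== CLAIM (what is proved, stated in full; the proofs are below) =====
def Claim_equal_solution : Prop := ∀ (song_cnt : Int) (d : Int) (k : Int) (h_ : Int), Dom_solution song_cnt d k h_ → Pre_solution song_cnt d k h_ → Spec_solution song_cnt d k h_ (solution song_cnt d k h_)

-- ===== LEMMAS AND PROOFS =====

-- `Ch n r` = the binomial coefficient C(n, r) extended by 0 outside 0 ≤ r ≤ n.
def Ch (n : Nat) (r : Int) : Int := if 0 ≤ r ∧ r ≤ (n : Int) then (n.choose r.toNat : Int) else 0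

-- the exact (un-reduced) count computed by A's recursion
def cntF : Nat → Int → Int → Int → Int
  | 0, d, k, h => if d < 0 ∨ k < 0 ∨ h < 0 then 0 else if d = 0 ∧ k = 0 ∧ h = 0 then 1 else 0
  | n+1, d, k, h =>
    if d < 0 ∨ k < 0 ∨ h < 0 then 0 else
      cntF n d k (h-1) + cntF n d (k-1) h + cntF n d (k-1) (h-1) + cntF n (d-1) k h +
      cntF n (d-1) k (h-1) + cntF n (d-1) (k-1) h + cntF n (d-1) (k-1) (h-1)

-- the inclusion–exclusion sum computed by B
def G (N : Nat) (d k h : Int) : Int :=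
  ∑ m ∈ Finset.range (N+1),
    (-1)^m * (N.choose m : Int) * (Ch (N - m) d * Ch (N - m) k * Ch (N - m) h)

lemma Ch_pascal (n : Nat) (r : Int) : Ch (n+1) r = Ch n r + Ch n (r-1) := by
  rcases lt_trichotomy r 0 with hr | hr | hr
  · rw [Ch, Ch, Ch, if_neg (by omega), if_neg (by omega), if_neg (by omega)]; ring
  · subst hr
    rw [Ch, Ch, Ch, if_pos (by constructor <;> omega), if_pos (by constructor <;> omega),
      if_neg (by omega)]
    simp
  · obtain ⟨t, rfl⟩ : ∃ t : Nat, r = (t : Int) + 1 := ⟨(r-1).toNat, by omega⟩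
    have h1 : ((t : Int) + 1).toNat = t + 1 := by omega
    have h2 : ((t : Int) + 1 - 1).toNat = t := by omega
    unfold Ch
    rw [h1]
    simp only [show (t : Int) + 1 - 1 = (t : Int) by ring, Int.toNat_natCast]
    by_cases ht : t + 1 ≤ n + 1
    · rw [if_pos (by constructor <;> omega)]
      rw [Nat.choose_succ_succ]
      by_cases ht2 : t + 1 ≤ n
      · rw [if_pos (by constructor <;> omega), if_pos (by constructor <;> omega)]
        push_cast [Nat.succ_eq_add_one]; ring
      · have : t = n := by omega
        subst this
        rw [if_neg (by omega), if_pos (by constructor <;> omega)]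
        push_cast [Nat.succ_eq_add_one, Nat.choose_succ_self]; ring
    · rw [if_neg (by omega), if_neg (by omega), if_neg (by omega)]
      ring

lemma G_succ (N : Nat) (d k h : Int) :
    G (N+1) d k h =
      G N d k (h-1) + G N d (k-1) h + G N d (k-1) (h-1) + G N (d-1) k h +
      G N (d-1) k (h-1) + G N (d-1) (k-1) h + G N (d-1) (k-1) (h-1) := by
  set P : Nat → Int := fun r => Ch r d * Ch r k * Ch r h with hP
  have e1 : G (N+1) d k h =
      (∑ m ∈ Finset.range (N+1), (-1:Int)^(m+1) * (((N+1).choose (m+1) : Nat) : Int) * P (N - m))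
        + P (N+1) := by
    unfold G
    rw [Finset.sum_range_succ']
    congr 1
    · apply Finset.sum_congr rfl; intro m hm
      have hh : N + 1 - (m+1) = N - m := by omega
      rw [hh]
    · simp [P]
  have e2 : (∑ m ∈ Finset.range (N+1), (-1:Int)^(m+1) * (((N+1).choose (m+1) : Nat) : Int) * P (N - m))
      = ∑ m ∈ Finset.range (N+1),
          (-((-1:Int)^m * (N.choose m : Int) * P (N - m)) - (-1:Int)^m * (N.choose (m+1) : Int) * P (N - m)) := by
    apply Finset.sum_congr rfl; intro m hm
    rw [Nat.choose_succ_succ]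
    push_cast; ring
  have e3 : (∑ m ∈ Finset.range (N+1), (-1:Int)^m * (N.choose m : Int) * P (N - m + 1))
      = P (N+1) - ∑ m ∈ Finset.range (N+1), (-1:Int)^m * (N.choose (m+1) : Int) * P (N - m) := by
    rw [Finset.sum_range_succ' (fun m => (-1:Int)^m * (N.choose m : Int) * P (N - m + 1)) N]
    rw [Finset.sum_range_succ (fun m => (-1:Int)^m * (N.choose (m+1) : Int) * P (N - m)) N]
    rw [Nat.choose_succ_self]
    have e4 : (∑ m ∈ Finset.range N, (-1:Int)^(m+1) * (N.choose (m+1) : Int) * P (N - (m+1) + 1))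
        = ∑ m ∈ Finset.range N, -((-1:Int)^m * (N.choose (m+1) : Int) * P (N - m)) := by
      apply Finset.sum_congr rfl; intro m hm
      simp only [Finset.mem_range] at hm
      have hh : N - (m+1) + 1 = N - m := by omega
      rw [hh]; ring
    rw [e4, Finset.sum_neg_distrib]
    simp
    ring
  have key : G (N+1) d k h + G N d k h
      = ∑ m ∈ Finset.range (N+1), (-1:Int)^m * (N.choose m : Int) * P (N - m + 1) := by
    rw [e1, e2, e3, Finset.sum_sub_distrib, Finset.sum_neg_distrib]
    unfold G
    ring
  have hprod : ∀ (r : Nat) (d k h : Int),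
      Ch (r+1) d * Ch (r+1) k * Ch (r+1) h =
        Ch r d * Ch r k * Ch r (h-1) + Ch r d * Ch r (k-1) * Ch r h +
        Ch r d * Ch r (k-1) * Ch r (h-1) + Ch r (d-1) * Ch r k * Ch r h +
        Ch r (d-1) * Ch r k * Ch r (h-1) + Ch r (d-1) * Ch r (k-1) * Ch r h +
        Ch r (d-1) * Ch r (k-1) * Ch r (h-1) + Ch r d * Ch r k * Ch r h := by
    intro r d k h
    rw [Ch_pascal r d, Ch_pascal r k, Ch_pascal r h]; ring
  have final : G (N+1) d k h = (G (N+1) d k h + G N d k h) - G N d k h := by ring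
  rw [final, key]
  unfold G P
  rw [← Finset.sum_sub_distrib]
  rw [← Finset.sum_add_distrib, ← Finset.sum_add_distrib, ← Finset.sum_add_distrib,
    ← Finset.sum_add_distrib, ← Finset.sum_add_distrib, ← Finset.sum_add_distrib]
  apply Finset.sum_congr rfl; intro m hm
  have hh : N - m + 1 = (N - m) + 1 := rfl
  rw [hh, hprod (N - m) d k h]
  ring

lemma Ch_zero' {n : Nat} {r : Int} (hr : r < 0 ∨ (n:Int) < r) : Ch n r = 0 := by
  simp [Ch]; omega

lemma G_zero_d {N : Nat} {d k h : Int} (hd : d < 0 ∨ (N : Int) < d) : G N d k h = 0 := by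
  apply Finset.sum_eq_zero; intro m hm
  have hle : ((N - m : Nat) : Int) ≤ (N : Int) := by exact_mod_cast Nat.sub_le N m
  have hz : Ch (N - m) d = 0 := Ch_zero' (by omega)
  rw [hz]; ring

lemma G_zero_k {N : Nat} {d k h : Int} (hk : k < 0 ∨ (N : Int) < k) : G N d k h = 0 := by
  apply Finset.sum_eq_zero; intro m hm
  have hle : ((N - m : Nat) : Int) ≤ (N : Int) := by exact_mod_cast Nat.sub_le N m
  have hz : Ch (N - m) k = 0 := Ch_zero' (by omega)
  rw [hz]; ring

lemma G_zero_h {N : Nat} {d k h : Int} (hh : h < 0 ∨ (N : Int) < h) : G N d k h = 0 := by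
  apply Finset.sum_eq_zero; intro m hm
  have hle : ((N - m : Nat) : Int) ≤ (N : Int) := by exact_mod_cast Nat.sub_le N m
  have hz : Ch (N - m) h = 0 := Ch_zero' (by omega)
  rw [hz]; ring

lemma cntF_eq_G : ∀ (N : Nat) (d k h : Int), cntF N d k h = G N d k h := by
  intro N
  induction N with
  | zero =>
    intro d k h
    have hG : G 0 d k h = Ch 0 d * Ch 0 k * Ch 0 h := by
      simp [G]
    rw [hG, cntF]
    unfold Ch
    split_ifs <;> simp_all <;> omega
  | succ N ih =>
    intro d k h
    rw [cntF]
    by_cases hneg : d < 0 ∨ k < 0 ∨ h < 0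
    · rw [if_pos hneg]
      rcases hneg with hd | hk | hh
      · rw [G_zero_d (Or.inl hd)]
      · rw [G_zero_k (Or.inl hk)]
      · rw [G_zero_h (Or.inl hh)]
    · rw [if_neg hneg, G_succ, ih, ih, ih, ih, ih, ih, ih]

-- ----- A-side: the memoized recursion computes cntF mod pvMod -----

def MemoOK (m : Std.HashMap (Int × Int × Int × Int) Int) : Prop :=
  ∀ (n d k h v : Int), m[(n, d, k, h)]? = some v → v = cntF n.toNat d k h % pvMod

lemma memoOK_empty : MemoOK ∅ := by
  intro n d k h v hv
  rw [Std.HashMap.getElem?_empty] at hv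
  exact absurd hv (by simp)

lemma cntF_zero_of_neg {M : Nat} {d k h : Int} (hneg : d < 0 ∨ k < 0 ∨ h < 0) :
    cntF M d k h = 0 := by
  cases M with
  | zero => rw [cntF, if_pos hneg]
  | succ M => rw [cntF, if_pos hneg]

lemma goA_correct : ∀ (fuel : Nat) (n d k h : Int) m, 0 ≤ n → n.toNat ≤ fuel → MemoOK m →
    (goA fuel n d k h m).1 = cntF n.toNat d k h % pvMod ∧ MemoOK (goA fuel n d k h m).2 := by
  intro fuel
  induction fuel with
  | zero =>
    intro n d k h m hn hf hm
    rw [goA.eq_def]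
    by_cases hneg : d < 0 ∨ k < 0 ∨ h < 0
    · rw [if_pos hneg]
      exact ⟨by rw [cntF_zero_of_neg hneg]; simp, hm⟩
    · rw [if_neg hneg]
      have hn0 : n = 0 := by omega
      rw [if_pos hn0, hn0]
      refine ⟨?_, hm⟩
      show _ = cntF (0:Int).toNat d k h % pvMod
      rw [show (0:Int).toNat = 0 from rfl, cntF, if_neg hneg]
      split_ifs <;> norm_num [pvMod]
  | succ f ih =>
    intro n d k h m hn hf hm
    rw [goA.eq_def]
    by_cases hneg : d < 0 ∨ k < 0 ∨ h < 0
    · rw [if_pos hneg]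
      exact ⟨by rw [cntF_zero_of_neg hneg]; simp, hm⟩
    · rw [if_neg hneg]
      by_cases hn0 : n = 0
      · rw [if_pos hn0, hn0]
        refine ⟨?_, hm⟩
        show _ = cntF (0:Int).toNat d k h % pvMod
        rw [show (0:Int).toNat = 0 from rfl, cntF, if_neg hneg]
        split_ifs <;> norm_num [pvMod]
      · rw [if_neg hn0]
        cases hl : m[(n, d, k, h)]? with
        | some v =>
          simp only []
          exact ⟨hm n d k h v hl, hm⟩
        | none =>
          simp only []
          have hfold : ∀ (ts : List (Int × Int × Int)) (a : Int) (mm : _), a % pvMod = a → MemoOK mm →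
              (ts.foldl (fun acc t =>
                  let s := goA f (n - 1) (d - t.1) (k - t.2.1) (h - t.2.2) acc.2
                  (PySem.Int.mod (acc.1 + s.1) pvMod, s.2)) (a, mm)).1
                = (a + (ts.map (fun t => cntF (n-1).toNat (d - t.1) (k - t.2.1) (h - t.2.2))).sum) % pvMod
              ∧ MemoOK (ts.foldl (fun acc t =>
                  let s := goA f (n - 1) (d - t.1) (k - t.2.1) (h - t.2.2) acc.2
                  (PySem.Int.mod (acc.1 + s.1) pvMod, s.2)) (a, mm)).2 := by
            intro ts
            induction ts with
            | nil =>
              intro a mm ha hmm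
              simpa using ⟨ha.symm, hmm⟩
            | cons t ts iht =>
              intro a mm ha hmm
              simp only [List.foldl_cons, List.map_cons, List.sum_cons]
              obtain ⟨hs1, hs2⟩ := ih (n - 1) (d - t.1) (k - t.2.1) (h - t.2.2) mm
                (by omega) (by omega) hmm
              have hmodpos : (0:Int) < pvMod := by norm_num [pvMod]
              have hq : PySem.Int.mod (a + (goA f (n - 1) (d - t.1) (k - t.2.1) (h - t.2.2) mm).1) pvMod
                  = (a + (goA f (n - 1) (d - t.1) (k - t.2.1) (h - t.2.2) mm).1) % pvMod :=
                PySem.Int.mod_eq_emod_of_pos hmodpos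
              obtain ⟨ht1, ht2⟩ := iht ((a + (goA f (n - 1) (d - t.1) (k - t.2.1) (h - t.2.2) mm).1) % pvMod)
                (goA f (n - 1) (d - t.1) (k - t.2.1) (h - t.2.2) mm).2
                (Int.emod_emod_of_dvd _ dvd_rfl) hs2
              refine ⟨?_, by rw [hq]; exact ht2⟩
              rw [hq, ht1, Int.emod_add_emod, hs1]
              rw [show a + cntF (n - 1).toNat (d - t.1) (k - t.2.1) (h - t.2.2) % pvMod
                    + (ts.map (fun t => cntF (n-1).toNat (d - t.1) (k - t.2.1) (h - t.2.2))).sum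
                  = cntF (n - 1).toNat (d - t.1) (k - t.2.1) (h - t.2.2) % pvMod
                    + (a + (ts.map (fun t => cntF (n-1).toNat (d - t.1) (k - t.2.1) (h - t.2.2))).sum) by ring]
              rw [Int.emod_add_emod]
              congr 1
              ring
          obtain ⟨hr1, hr2⟩ := hfold pvTriples 0 m (by norm_num) hm
          have hval : (pvTriples.foldl (fun acc t =>
                  let s := goA f (n - 1) (d - t.1) (k - t.2.1) (h - t.2.2) acc.2
                  (PySem.Int.mod (acc.1 + s.1) pvMod, s.2)) (0, m)).1
              = cntF n.toNat d k h % pvMod := by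
            rw [hr1]
            have hsucc : n.toNat = (n - 1).toNat + 1 := by omega
            rw [hsucc, cntF, if_neg hneg]
            congr 1
            simp [pvTriples]
            ring
          refine ⟨hval, ?_⟩
          intro n' d' k' h' v hv
          rw [Std.HashMap.getElem?_insert] at hv
          by_cases hkey : ((n, d, k, h) : Int × Int × Int × Int) = (n', d', k', h')
          · rw [if_pos (by simp [hkey])] at hv
            simp only [Prod.mk.injEq] at hkey
            obtain ⟨e1, e2, e3, e4⟩ := hkey
            subst e1; subst e2; subst e3; subst e4
            cases hv
            exact hval
          · rw [if_neg (by simpa using hkey)] at hv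
            exact hr2 n' d' k' h' v hv

lemma solution_eq_cntF (n d k h : Int) (hn : 0 ≤ n) :
    solution n d k h = cntF n.toNat d k h % pvMod := by
  exact (goA_correct n.toNat n d k h ∅ hn le_rfl memoOK_empty).1

-- ----- B-side: the fold computes G mod pvMod -----

lemma pyBinom_fold (n : Nat) : ∀ t : Nat, t ≤ n →
    (List.range t).foldl
      (fun b (i : Nat) => PySem.Int.floordiv (b * ((n:Int) - (i:Int))) ((i:Int) + 1)) 1
      = (n.choose t : Int) := by
  intro t
  induction t with
  | zero => intro _; simp
  | succ t ih =>
    intro ht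
    rw [List.range_succ, List.foldl_append, ih (by omega)]
    simp only [List.foldl_cons, List.foldl_nil]
    have h1 : (n:Int) - (t:Int) = ((n - t : Nat) : Int) := by
      push_cast [Nat.cast_sub (by omega : t ≤ n)]; ring
    have h2 : ((t:Int) + 1) = ((t + 1 : Nat) : Int) := by push_cast; ring
    rw [h1, h2, show (n.choose t : Int) * ((n - t : Nat) : Int) = ((n.choose t * (n - t) : Nat) : Int) by push_cast; ring]
    rw [← Nat.choose_succ_right_eq]
    rw [PySem.Int.floordiv_natCast]
    rw [Nat.mul_div_cancel _ (by omega)]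

lemma pyBinom_eq (n : Nat) (r : Int) : pyBinom (n : Int) r = Ch n r := by
  unfold pyBinom Ch
  by_cases hr : r < 0 ∨ r > (n : Int)
  · rw [if_pos hr, if_neg (by omega)]
  · rw [if_neg hr, if_pos (by omega)]
    obtain ⟨t, rfl⟩ : ∃ t : Nat, r = (t : Int) := ⟨r.toNat, by omega⟩
    rw [PySem.List.pyRange_zero_nat, List.foldl_map, Int.toNat_natCast]
    exact pyBinom_fold n t (by omega)

lemma foldl_altsum (f : Int → Int) : ∀ (K : Nat) (a : Int),
    ((List.range K).map (fun k : Nat => (k:Int))).foldl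
      (fun total m => if PySem.Int.mod m 2 = 0 then total + f m else total - f m) a
    = a + ∑ m ∈ Finset.range K, (-1:Int)^m * f (m:Int) := by
  intro K
  induction K with
  | zero => intro a; simp
  | succ K ih =>
    intro a
    rw [List.range_succ, List.map_append, List.foldl_append, ih]
    simp only [List.map_cons, List.map_nil, List.foldl_cons, List.foldl_nil]
    rw [Finset.sum_range_succ]
    have hm2 : PySem.Int.mod (K:Int) 2 = (K:Int) % 2 := PySem.Int.mod_eq_emod_of_pos (by norm_num)
    by_cases hK : K % 2 = 0
    · rw [if_pos (by rw [hm2]; omega)]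
      rw [Even.neg_one_pow (Nat.even_iff.2 hK)]
      ring
    · rw [if_neg (by rw [hm2]; omega)]
      rw [Odd.neg_one_pow (Nat.odd_iff.2 (by omega))]
      ring

lemma solution_alt_eq_cntF (n d k h : Int) (hn : 0 ≤ n) :
    solution_alt n d k h = cntF n.toNat d k h % pvMod := by
  have hN : n = (n.toNat : Int) := (Int.toNat_of_nonneg hn).symm
  set N := n.toNat with hNdef
  rw [cntF_eq_G]
  unfold solution_alt
  by_cases hg : d < 0 ∨ k < 0 ∨ h < 0 ∨ d > n ∨ k > n ∨ h > n
  · rw [if_pos hg]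
    have hG : G N d k h = 0 := by
      rcases hg with hx | hx | hx | hx | hx | hx
      · exact G_zero_d (Or.inl hx)
      · exact G_zero_k (Or.inl hx)
      · exact G_zero_h (Or.inl hx)
      · exact G_zero_d (Or.inr (by omega))
      · exact G_zero_k (Or.inr (by omega))
      · exact G_zero_h (Or.inr (by omega))
    rw [hG]
    norm_num
  · rw [if_neg hg]
    have h1 : PySem.List.pyRange 0 (n + 1) 1 = (List.range (N+1)).map (fun k : Nat => (k:Int)) := by
      rw [show n + 1 = ((N + 1 : Nat) : Int) by omega, PySem.List.pyRange_zero_nat]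
    rw [h1, foldl_altsum (fun m => pyBinom n m * pyBinom (n - m) d *
          pyBinom (n - m) k * pyBinom (n - m) h) (N+1) 0, zero_add]
    rw [PySem.Int.mod_eq_emod_of_pos (by norm_num [pvMod])]
    congr 1
    apply Finset.sum_congr rfl
    intro m hm
    simp only [Finset.mem_range] at hm
    have hmN : m ≤ N := by omega
    have e1 : pyBinom n (m : Int) = (N.choose m : Int) := by
      rw [hN, pyBinom_eq]
      unfold Ch
      rw [if_pos (by constructor <;> omega), Int.toNat_natCast]
    have e2 : n - (m : Int) = ((N - m : Nat) : Int) := by omega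
    rw [e1, e2, pyBinom_eq, pyBinom_eq, pyBinom_eq]
    ring

-- ===== VERDICT (by name: the statement is the Claim_ definition above) =====
theorem solution_spec : Claim_equal_solution := by
  intro n d k h _ hpre
  unfold Spec_solution
  by_cases hn : 0 ≤ n
  · rw [solution_eq_cntF n d k h hn, solution_alt_eq_cntF n d k h hn]
  · -- n < 0: Pre forces a negative d/k/h, both programs return 0 immediately
    have hneg : d < 0 ∨ k < 0 ∨ h < 0 := by
      rcases hpre with h1 | h2 | h3 <;> [exact h1; omega; omega]
    rw [solution, goA.eq_def, solution_alt]
    simp only [if_pos hneg]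
    have : d < 0 ∨ k < 0 ∨ h < 0 ∨ d > n ∨ k > n ∨ h > n := by tauto
    simp [this]
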